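-- pv_equiv track=rewrite | github.com/devakowakou/adventofcode | day12/solution.py | placement_bitmask
-- ===== SOURCE A (Python) =====
-- def placement_bitmask(cells, w, h, top, left):
--     """
--     Given normalized cells (list of (r,c)), board width w and height h,
--     and top,left placement, return integer bitmask with bits set for occupied cells.
--     Bit indexing: row-major: bit index = r * w + c
--     """
--     mask = 0
--     for r, c in cells:
--         rr = top + r
--         cc = left + c
--         if rr < 0 or rr >= h or cc < 0 or cc >= w:
--             return None
--         idx = rr * w + cc
--         mask |= (1 << idx)
--     return mask
-- ===== SOURCE B (Python) =====
-- def placement_bitmask(cells, w, h, top, left):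
--     """Bounds checked once via extrema (min/max); the mask is then an arithmetic
--     sum of powers of two over the DISTINCT translated indices (no bitwise ops)."""
--     if not cells:
--         return 0
--     rows = [top + r for r, c in cells]
--     cols = [left + c for r, c in cells]
--     if min(rows) < 0 or max(rows) >= h or min(cols) < 0 or max(cols) >= w:
--         return None
--     return sum(2 ** i for i in {rr * w + cc for rr, cc in zip(rows, cols)})
-- ===== Notes on version B (the rewrite author's own statement) =====
-- stated objective: alternative
-- what changed: B replaces A's fused per-cell check-and-OR loop by a different algorithm: bounds are validated once via the extrema (min/max) of the translated row and column lists, and the mask is then computed arithmetically as the sum of 2**i over the SET of distinct translated indices (no bitwise operations, duplicate-safe because duplicates are removed before summing).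
import Mathlib
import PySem

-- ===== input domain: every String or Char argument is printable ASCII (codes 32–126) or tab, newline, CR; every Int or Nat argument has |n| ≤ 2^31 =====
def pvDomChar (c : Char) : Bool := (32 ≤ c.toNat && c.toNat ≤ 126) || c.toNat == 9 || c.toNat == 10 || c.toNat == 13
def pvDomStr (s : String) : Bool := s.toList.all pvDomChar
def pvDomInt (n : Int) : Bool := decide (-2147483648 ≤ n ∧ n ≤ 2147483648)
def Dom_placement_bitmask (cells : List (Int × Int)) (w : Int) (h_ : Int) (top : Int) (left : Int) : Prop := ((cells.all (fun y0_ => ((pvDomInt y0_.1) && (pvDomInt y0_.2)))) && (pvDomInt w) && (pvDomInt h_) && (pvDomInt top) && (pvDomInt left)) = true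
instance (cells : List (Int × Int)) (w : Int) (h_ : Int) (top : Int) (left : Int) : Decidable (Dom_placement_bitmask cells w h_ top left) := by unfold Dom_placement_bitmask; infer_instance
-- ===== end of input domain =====

-- B validates via extrema (min/max of translated rows/cols) and builds the mask as an
-- arithmetic sum of powers of two over the DISTINCT indices instead of A's fused
-- accumulate-and-bail OR loop; alternative algorithm, same asymptotic cost.


-- ===== PORT A =====
-- mask-accumulating loop with early None on the first out-of-bounds cell (A's fused loop)
def pvGoA (w h_ top left : Int) : List (Int × Int) → Int → Option Int
  | [], mask => some mask
  | (r, c) :: rest, mask =>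
    let rr := top + r
    let cc := left + c
    if rr < 0 ∨ rr ≥ h_ ∨ cc < 0 ∨ cc ≥ w then none
    else pvGoA w h_ top left rest (PySem.Int.bor mask ((1 : Int) <<< (rr * w + cc).toNat))

def placement_bitmask (cells : List (Int × Int)) (w : Int) (h_ : Int) (top : Int) (left : Int) : Option Int :=
  pvGoA w h_ top left cells 0

-- ===== PORT B =====
-- B: guard the empty board, validate via min/max of the translated rows and columns,
-- then sum 2^i over the set of distinct indices (Python: sum(2**i for i in {...})).
def placement_bitmask_alt (cells : List (Int × Int)) (w : Int) (h_ : Int) (top : Int) (left : Int) : Option Int :=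
  if cells = [] then some 0
  else
    let rows := cells.map fun rc => top + rc.1
    let cols := cells.map fun rc => left + rc.2
    match PySem.List.min? rows (fun x => x), PySem.List.max? rows (fun x => x),
          PySem.List.min? cols (fun x => x), PySem.List.max? cols (fun x => x) with
    | some mnr, some mxr, some mnc, some mxc =>
        if mnr < 0 ∨ mxr ≥ h_ ∨ mnc < 0 ∨ mxc ≥ w then none
        else some (((PySem.Set.ofList ((rows.zip cols).map fun p => p.1 * w + p.2)).map
                      fun i => (2 : Int) ^ i.toNat).sum)
    | _, _, _, _ => none  -- unreachable: rows/cols are nonempty, min?/max? are some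

-- ===== PRECONDITION & SPEC =====
def Spec_placement_bitmask (cells : List (Int × Int)) (w : Int) (h_ : Int) (top : Int) (left : Int) (out : Option Int) : Prop := out = placement_bitmask_alt cells w h_ top left
instance (cells : List (Int × Int)) (w : Int) (h_ : Int) (top : Int) (left : Int) (out : Option Int) : Decidable (Spec_placement_bitmask cells w h_ top left out) := by unfold Spec_placement_bitmask; infer_instance

-- ===== CLAIM (what is proved, stated in full; the proofs are below) =====
def Claim_equal_placement_bitmask : Prop := ∀ (cells : List (Int × Int)) (w : Int) (h_ : Int) (top : Int) (left : Int), Dom_placement_bitmask cells w h_ top left → Spec_placement_bitmask cells w h_ top left (placement_bitmask cells w h_ top left)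

-- ===== LEMMAS AND PROOFS =====

-- carry-free addition of a fresh power of two is bitwise or
theorem pv_disj_add_eq_lor : ∀ (i : Nat) (m : Nat), m.testBit i = false → m + 2^i = m ||| 2^i := by
  intro i
  induction i with
  | zero =>
    intro m h
    have hm : m % 2 = 0 := by simpa [Nat.testBit_zero] using h
    have h1 : (1 : Nat) = Nat.bit true 0 := rfl
    have h2 : m = Nat.bit false (m >>> 1) := by
      conv_lhs => rw [← Nat.bit_testBit_zero_shiftRight_one m]
      simp [h]
    rw [pow_zero, h1]
    conv_lhs => rw [h2]
    conv_rhs => rw [h2]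
    rw [Nat.lor_bit]
    simp [Nat.bit, Nat.shiftRight_one]
  | succ i ih =>
    intro m h
    have h2 : m = Nat.bit (m.testBit 0) (m >>> 1) := (Nat.bit_testBit_zero_shiftRight_one m).symm
    have hp : (2^(i+1) : Nat) = Nat.bit false (2^i) := by simp [Nat.bit, pow_succ]; ring
    have ht : (m >>> 1).testBit i = false := by
      rw [Nat.shiftRight_one, ← Nat.testBit_succ]; exact h
    conv_lhs => rw [h2]
    conv_rhs => rw [h2]
    rw [hp, Nat.lor_bit, ← ih _ ht]
    cases hb : m.testBit 0 <;> simp [Nat.bit, Nat.shiftRight_one] <;> ring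

-- bits of A's or-accumulating fold: accumulator bits plus membership
theorem pv_testBit_foldl_lor : ∀ (ns : List Nat) (a : Nat) (j : Nat),
    (ns.foldl (fun m i => m ||| 2^i) a).testBit j = (a.testBit j || decide (j ∈ ns)) := by
  intro ns
  induction ns with
  | nil => simp
  | cons i t ih =>
    intro a j
    simp only [List.foldl_cons, ih, Nat.testBit_lor, List.mem_cons]
    by_cases hji : j = i
    · subst hji; simp [Nat.testBit_two_pow_self]
    · simp [Nat.testBit_two_pow_of_ne (fun he => hji he.symm), hji]

-- bits of B's sum of distinct powers of two: membership
theorem pv_testBit_sum_pow : ∀ (S : List Nat), S.Nodup → ∀ (j : Nat),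
    ((S.map (fun i => 2^i)).sum).testBit j = decide (j ∈ S) := by
  intro S
  induction S with
  | nil => simp
  | cons i t ih =>
    intro hnd j
    have hit : i ∉ t := (List.nodup_cons.mp hnd).1
    have htn : t.Nodup := (List.nodup_cons.mp hnd).2
    have hfree : ((t.map (fun i => 2^i)).sum).testBit i = false := by
      simpa [hit] using ih htn i
    have : (2:Nat)^i + (t.map (fun i => 2^i)).sum = (t.map (fun i => 2^i)).sum ||| 2^i := by
      rw [Nat.add_comm]; exact pv_disj_add_eq_lor i _ hfree
    simp only [List.map_cons, List.sum_cons, this, Nat.testBit_lor, ih htn, List.mem_cons]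
    by_cases hji : j = i
    · subst hji; simp [Nat.testBit_two_pow_self]
    · simp [Nat.testBit_two_pow_of_ne (fun he => hji he.symm), hji]

-- the or-fold over any index list equals the power sum over any nodup list with the same members
theorem pv_fold_eq_sum (ns S : List Nat) (hnd : S.Nodup) (hmem : ∀ j, j ∈ S ↔ j ∈ ns) :
    ns.foldl (fun m i => m ||| 2^i) 0 = (S.map (fun i => 2^i)).sum := by
  apply Nat.eq_of_testBit_eq
  intro j
  rw [pv_testBit_foldl_lor, pv_testBit_sum_pow S hnd, Nat.zero_testBit, Bool.false_or]
  simp [hmem]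

-- A's fused loop equals: translate, check any out-of-bounds, else or-fold the bits
theorem pvGoA_eq (w h_ top left : Int) (cells : List (Int × Int)) (mask : Int) :
    pvGoA w h_ top left cells mask =
      (let pts := cells.map (fun rc => (top + rc.1, left + rc.2))
       if pts.any (fun p => decide (p.1 < 0) || decide (p.1 ≥ h_) || decide (p.2 < 0) || decide (p.2 ≥ w)) then
         none
       else
         some (pts.foldl (fun m p => PySem.Int.bor m ((1 : Int) <<< (p.1 * w + p.2).toNat)) mask)) := by
  induction cells generalizing mask with
  | nil => simp [pvGoA]
  | cons hd tl ih =>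
    obtain ⟨r, c⟩ := hd
    simp only [pvGoA, List.map_cons, List.any_cons, List.foldl_cons]
    by_cases hb : top + r < 0 ∨ top + r ≥ h_ ∨ left + c < 0 ∨ left + c ≥ w
    · rw [if_pos hb]
      have : (decide (top + r < 0) || decide (top + r ≥ h_) || decide (left + c < 0) ||
          decide (left + c ≥ w)) = true := by
        simpa [decide_eq_true_eq, or_assoc] using hb
      simp [this]
    · rw [if_neg hb]
      have : (decide (top + r < 0) || decide (top + r ≥ h_) || decide (left + c < 0) ||
          decide (left + c ≥ w)) = false := by
        simp only [not_or] at hb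
        simp [hb.1, hb.2.1, hb.2.2.1, hb.2.2.2]
      simp only [this, Bool.false_or]
      exact ih _

-- cast the or-fold over nonnegative Int indices down to Nat
theorem pv_foldl_bor_cast (ids : List Int) (h : ∀ i ∈ ids, 0 ≤ i) (a : Nat) :
    ids.foldl (fun (m : Int) (i : Int) => PySem.Int.bor m ((1:Int) <<< i.toNat)) (a : Int)
      = (((ids.map Int.toNat).foldl (fun m n => m ||| 2^n) a : Nat) : Int) := by
  induction ids generalizing a with
  | nil => simp
  | cons i t ih =>
    simp only [List.foldl_cons, List.map_cons]
    have h2 : PySem.Int.bor ((a : Nat) : Int) ((1:Int) <<< i.toNat) = (((a ||| 2^i.toNat : Nat)) : Int) := by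
      rw [show (1:Int) <<< i.toNat = ((2^i.toNat : Nat) : Int) by simp [Int.shiftLeft_eq]]
      exact_mod_cast PySem.Int.bor_natCast a (2^i.toNat)
    rw [h2, ih (fun x hx => h x (List.mem_cons_of_mem i hx))]

-- cast the power sum down to Nat
theorem pv_sum_pow_cast (l : List Int) :
    (l.map (fun i => (2:Int) ^ i.toNat)).sum = ((((l.map Int.toNat).map (fun n => 2^n)).sum : Nat) : Int) := by
  induction l with
  | nil => simp
  | cons i t ih =>
    simp only [List.map_cons, List.sum_cons, ih]
    push_cast
    ring

-- ===== VERDICT (by name: the statement is the Claim_ definition above) =====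
theorem placement_bitmask_spec : Claim_equal_placement_bitmask := by
  intro cells w h_ top left _
  unfold Spec_placement_bitmask placement_bitmask placement_bitmask_alt
  rw [pvGoA_eq]
  cases cells with
  | nil => simp
  | cons hd tl =>
    simp only [List.cons_ne_nil, if_false]
    rcases hmnr : PySem.List.min? ((hd :: tl).map fun rc => top + rc.1) (fun x => x) with _ | mnr
    · exact absurd ((PySem.List.min?_eq_none_iff _ _).mp hmnr) (by simp)
    rcases hmxr : PySem.List.max? ((hd :: tl).map fun rc => top + rc.1) (fun x => x) with _ | mxr
    · exact absurd ((PySem.List.max?_eq_none_iff _ _).mp hmxr) (by simp)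
    rcases hmnc : PySem.List.min? ((hd :: tl).map fun rc => left + rc.2) (fun x => x) with _ | mnc
    · exact absurd ((PySem.List.min?_eq_none_iff _ _).mp hmnc) (by simp)
    rcases hmxc : PySem.List.max? ((hd :: tl).map fun rc => left + rc.2) (fun x => x) with _ | mxc
    · exact absurd ((PySem.List.max?_eq_none_iff _ _).mp hmxc) (by simp)
    simp only [hmnr, hmxr, hmnc, hmxc]
    set pts := (hd :: tl).map (fun rc => (top + rc.1, left + rc.2)) with hpts
    have hrows : (hd :: tl).map (fun rc => top + rc.1) = pts.map Prod.fst := by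
      simp [hpts, List.map_map, Function.comp]
    have hcols : (hd :: tl).map (fun rc => left + rc.2) = pts.map Prod.snd := by
      simp [hpts, List.map_map, Function.comp]
    have hzip : ((hd :: tl).map fun rc => top + rc.1).zip ((hd :: tl).map fun rc => left + rc.2) = pts := by
      rw [List.zip_map']
    -- the two out-of-bounds tests agree
    have hcond : (pts.any fun p => decide (p.1 < 0) || decide (p.1 ≥ h_) || decide (p.2 < 0) || decide (p.2 ≥ w)) = true
        ↔ (mnr < 0 ∨ mxr ≥ h_ ∨ mnc < 0 ∨ mxc ≥ w) := by
      constructor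
      · intro hany
        obtain ⟨p, hp, hpred⟩ := List.any_eq_true.mp hany
        have hb : p.1 < 0 ∨ p.1 ≥ h_ ∨ p.2 < 0 ∨ p.2 ≥ w := by
          simpa [decide_eq_true_eq, or_assoc] using hpred
        have h1 : p.1 ∈ pts.map Prod.fst := List.mem_map_of_mem hp
        have h2 : p.2 ∈ pts.map Prod.snd := List.mem_map_of_mem hp
        rcases hb with hb | hb | hb | hb
        · exact Or.inl (lt_of_le_of_lt (PySem.List.min?_isMin hmnr _ (hrows ▸ h1)) hb)
        · exact Or.inr (Or.inl (le_trans hb (PySem.List.max?_isMax hmxr _ (hrows ▸ h1))))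
        · exact Or.inr (Or.inr (Or.inl (lt_of_le_of_lt (PySem.List.min?_isMin hmnc _ (hcols ▸ h2)) hb)))
        · exact Or.inr (Or.inr (Or.inr (le_trans hb (PySem.List.max?_isMax hmxc _ (hcols ▸ h2)))))
      · intro hc
        apply List.any_eq_true.mpr
        rcases hc with hc | hc | hc | hc
        · obtain ⟨p, hp, he⟩ := List.mem_map.mp (hrows ▸ PySem.List.min?_mem hmnr)
          exact ⟨p, hp, by simp [he, hc]⟩
        · obtain ⟨p, hp, he⟩ := List.mem_map.mp (hrows ▸ PySem.List.max?_mem hmxr)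
          exact ⟨p, hp, by simp [he, hc]⟩
        · obtain ⟨p, hp, he⟩ := List.mem_map.mp (hcols ▸ PySem.List.min?_mem hmnc)
          exact ⟨p, hp, by simp [he, hc]⟩
        · obtain ⟨p, hp, he⟩ := List.mem_map.mp (hcols ▸ PySem.List.max?_mem hmxc)
          exact ⟨p, hp, by simp [he, hc]⟩
    by_cases hoob : mnr < 0 ∨ mxr ≥ h_ ∨ mnc < 0 ∨ mxc ≥ w
    · rw [if_pos (hcond.mpr hoob), if_pos hoob]
    · rw [if_neg (fun h => hoob (hcond.mp h)), if_neg hoob]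
      -- every translated cell is in bounds
      have hin : ∀ p ∈ pts, 0 ≤ p.1 ∧ p.1 < h_ ∧ 0 ≤ p.2 ∧ p.2 < w := by
        intro p hp
        have hfalse : (pts.any fun p => decide (p.1 < 0) || decide (p.1 ≥ h_) || decide (p.2 < 0) || decide (p.2 ≥ w)) = false := by
          rcases hb : (pts.any fun p => decide (p.1 < 0) || decide (p.1 ≥ h_) || decide (p.2 < 0) || decide (p.2 ≥ w)) with _ | _
          · rfl
          · exact absurd (hcond.mp hb) hoob
        have := List.any_eq_false.mp hfalse p hp
        simp at this
        omega
      congr 1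
      rw [hzip]
      set ids := pts.map (fun p => p.1 * w + p.2) with hids
      have hnonneg : ∀ i ∈ ids, 0 ≤ i := by
        intro i hi
        obtain ⟨p, hp, he⟩ := List.mem_map.mp hi
        obtain ⟨h1, h2, h3, h4⟩ := hin p hp
        have hw : 0 < w := lt_of_le_of_lt h3 h4
        subst he
        have : 0 ≤ p.1 * w := mul_nonneg h1 (le_of_lt hw)
        omega
      have e1 : pts.foldl (fun m p => PySem.Int.bor m ((1:Int) <<< (p.1 * w + p.2).toNat)) (0:Int)
          = ids.foldl (fun (m : Int) (i : Int) => PySem.Int.bor m ((1:Int) <<< i.toNat)) (0:Int) := by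
        rw [hids]; simp only [List.foldl_map]
      have e2 := pv_foldl_bor_cast ids hnonneg 0
      rw [Nat.cast_zero] at e2
      have e3 := pv_sum_pow_cast ((PySem.Set.ofList ids) : List Int)
      rw [e1, e2, e3]
      congr 1
      apply pv_fold_eq_sum
      · apply List.Nodup.map_on
        · intro x hx y hy hxy
          have hx' : 0 ≤ x := hnonneg x ((PySem.Set.mem_ofList _ _).mp hx)
          have hy' : 0 ≤ y := hnonneg y ((PySem.Set.mem_ofList _ _).mp hy)
          omega
        · exact PySem.Set.nodup_ofList ids
      · intro j
        constructor
        · intro hj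
          obtain ⟨i, hi, he⟩ := List.mem_map.mp hj
          exact List.mem_map.mpr ⟨i, (PySem.Set.mem_ofList _ _).mp hi, he⟩
        · intro hj
          obtain ⟨i, hi, he⟩ := List.mem_map.mp hj
          exact List.mem_map.mpr ⟨i, (PySem.Set.mem_ofList _ _).mpr hi, he⟩
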